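-- pv_equiv track=rewrite | github.com/eldorPulatov/Python | IT-планета/Functions.py | match_next_or_previous
-- ===== SOURCE A (Python) =====
-- def match_next_or_previous(visitedLocations: list, visitedLocationPointId: int, locationPointId: int) -> bool:
--     """
--     Функция проверки точки локации на точку, совпадающую со следующей и/или с предыдущей точками
--     :param visitedLocations:
--     :param visitedLocationPointId:
--     :param locationPointId:
--     :return True or False, если точка совпадает со следующией и/или с предыдущей:
--     """
--     visitedLocations_len = len(visitedLocations)
--     for i in range(visitedLocations_len):
--         if visitedLocations[i] == visitedLocationPointId:
--             if i > 0 and visitedLocations[i - 1] == locationPointId: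
--                 # Совпадает с предыдущей
--                 return False
--             if i < visitedLocations_len - 1 and visitedLocations[i + 1] == locationPointId:
--                 # Совпадает со следующей
--                 return False
--
--     return True
-- ===== SOURCE B (Python) =====
-- def match_next_or_previous(visitedLocations: list, visitedLocationPointId: int, locationPointId: int) -> bool:
--     pv = {i for i, x in enumerate(visitedLocations) if x == visitedLocationPointId}
--     pl = {i for i, x in enumerate(visitedLocations) if x == locationPointId}
--     return pl.isdisjoint({i + 1 for i in pv}) and pv.isdisjoint({i + 1 for i in pl})
-- ===== Notes on version B (the rewrite author's own statement) =====
-- stated objective: alternative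
-- what changed: Replaces A's indexed scan with i-1/i+1 neighbour lookups by building the sets of occurrence indices of each id and testing disjointness of one set against the other shifted by +1 (both orientations).
import Mathlib
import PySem

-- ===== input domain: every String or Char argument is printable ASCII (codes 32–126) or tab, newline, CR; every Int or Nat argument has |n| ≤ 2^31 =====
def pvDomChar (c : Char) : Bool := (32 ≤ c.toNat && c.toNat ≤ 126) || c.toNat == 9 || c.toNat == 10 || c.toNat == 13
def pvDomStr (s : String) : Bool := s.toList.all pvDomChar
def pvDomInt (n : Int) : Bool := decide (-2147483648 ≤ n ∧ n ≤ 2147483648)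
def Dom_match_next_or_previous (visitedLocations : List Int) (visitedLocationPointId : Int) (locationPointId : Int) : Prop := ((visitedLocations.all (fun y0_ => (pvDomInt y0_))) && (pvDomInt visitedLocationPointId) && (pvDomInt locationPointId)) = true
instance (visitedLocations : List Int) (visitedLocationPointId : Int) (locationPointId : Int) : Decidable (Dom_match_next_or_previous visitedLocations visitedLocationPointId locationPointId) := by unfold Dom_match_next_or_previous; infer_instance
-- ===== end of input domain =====

-- B replaces A's indexed scan with neighbour lookups by an occurrence-index-set computation: build the sets of positions of each id, shift one by +1 and test disjointness (alternative algorithm; return value only).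

-- ===== PORT A =====
-- A's for-loop over range(len(xs)) with early returns; i is the loop index.
-- (inside the loop i < xs.length, so Python's 'i < len - 1' equals 'i + 1 < xs.length')
def matchNextOrPrevLoop (xs : List Int) (v l : Int) (i : Nat) : Bool :=
  if i < xs.length then
    (if xs.getD i 0 = v then
       if 0 < i ∧ xs.getD (i - 1) 0 = l then false
       else if i + 1 < xs.length ∧ xs.getD (i + 1) 0 = l then false
       else matchNextOrPrevLoop xs v l (i + 1)
     else matchNextOrPrevLoop xs v l (i + 1))
  else true
termination_by xs.length - i

def match_next_or_previous (visitedLocations : List Int) (visitedLocationPointId : Int) (locationPointId : Int) : Bool :=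
  matchNextOrPrevLoop visitedLocations visitedLocationPointId locationPointId 0

-- ===== PORT B =====
-- {i for i, x in enumerate(xs) if x == id} : set of occurrence indices of id
def occIdxSet (xs : List Int) (id : Int) : PySem.Set Int :=
  PySem.Set.ofList (((PySem.List.enumerate xs 0).filter (fun p => p.2 == id)).map (fun p => p.1))

-- pl.isdisjoint({i+1 for i in pv}) and pv.isdisjoint({i+1 for i in pl})
def match_next_or_previous_alt (visitedLocations : List Int) (visitedLocationPointId : Int) (locationPointId : Int) : Bool :=
  let pv := occIdxSet visitedLocations visitedLocationPointId
  let pl := occIdxSet visitedLocations locationPointId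
  PySem.Set.isdisjoint pl (PySem.Set.ofList (pv.map (fun i => i + 1))) &&
  PySem.Set.isdisjoint pv (PySem.Set.ofList (pl.map (fun i => i + 1)))

-- ===== PRECONDITION & SPEC =====
def Spec_match_next_or_previous (visitedLocations : List Int) (visitedLocationPointId : Int) (locationPointId : Int) (out : Bool) : Prop := out = match_next_or_previous_alt visitedLocations visitedLocationPointId locationPointId
instance (visitedLocations : List Int) (visitedLocationPointId : Int) (locationPointId : Int) (out : Bool) : Decidable (Spec_match_next_or_previous visitedLocations visitedLocationPointId locationPointId out) := by unfold Spec_match_next_or_previous; infer_instance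

-- ===== CLAIM (what is proved, stated in full; the proofs are below) =====
def Claim_equal_match_next_or_previous : Prop := ∀ (visitedLocations : List Int) (visitedLocationPointId : Int) (locationPointId : Int), Dom_match_next_or_previous visitedLocations visitedLocationPointId locationPointId → Spec_match_next_or_previous visitedLocations visitedLocationPointId locationPointId (match_next_or_previous visitedLocations visitedLocationPointId locationPointId)

-- ===== LEMMAS AND PROOFS =====

-- a "bad" index for A: xs[j] = v and a neighbour equals l
def BadIdx (xs : List Int) (v l : Int) (j : Nat) : Prop :=
  xs.getD j 0 = v ∧ ((0 < j ∧ xs.getD (j - 1) 0 = l) ∨ (j + 1 < xs.length ∧ xs.getD (j + 1) 0 = l))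

-- a "bad" adjacent position: xs[k] = v, xs[k+1] = l or the symmetric orientation
def BadPair (xs : List Int) (v l : Int) (k : Nat) : Prop :=
  k + 1 < xs.length ∧
    ((xs.getD k 0 = v ∧ xs.getD (k + 1) 0 = l) ∨ (xs.getD k 0 = l ∧ xs.getD (k + 1) 0 = v))

lemma matchLoop_iff (xs : List Int) (v l : Int) (i : Nat) :
    matchNextOrPrevLoop xs v l i = true ↔ ∀ j, i ≤ j → j < xs.length → ¬ BadIdx xs v l j := by
  induction' hN : xs.length - i using Nat.strong_induction_on with n ih generalizing i
  rw [matchNextOrPrevLoop]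
  by_cases hi : i < xs.length
  · simp only [hi, if_true]
    have hrec : matchNextOrPrevLoop xs v l (i + 1) = true ↔
        ∀ j, i + 1 ≤ j → j < xs.length → ¬ BadIdx xs v l j := by
      exact ih (xs.length - (i + 1)) (by omega) (i + 1) rfl
    by_cases hv : xs.getD i 0 = v
    · simp only [hv, if_true]
      by_cases hp : 0 < i ∧ xs.getD (i - 1) 0 = l
      · simp only [hp]
        constructor
        · intro h; cases h
        · intro h
          exact absurd ⟨hv, Or.inl hp⟩ (h i le_rfl hi)
      · simp only [hp, if_false]
        by_cases hnx : i + 1 < xs.length ∧ xs.getD (i + 1) 0 = l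
        · simp only [hnx]
          constructor
          · intro h; cases h
          · intro h
            exact absurd ⟨hv, Or.inr hnx⟩ (h i le_rfl hi)
        · simp only [hnx, if_false]
          rw [hrec]
          constructor
          · intro h j hij hj hb
            rcases Nat.eq_or_lt_of_le hij with rfl | hlt
            · rcases hb.2 with hb2 | hb2
              · exact hp hb2
              · exact hnx hb2
            · exact h j hlt hj hb
          · intro h j hij hj
            exact h j (by omega) hj
    · simp only [hv, if_false]
      rw [hrec]
      constructor
      · intro h j hij hj hb
        rcases Nat.eq_or_lt_of_le hij with rfl | hlt
        · exact hv hb.1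
        · exact h j hlt hj hb
      · intro h j hij hj
        exact h j (by omega) hj
  · simp only [hi, if_false, true_iff]
    intro j hij hj _
    exact hi (lt_of_le_of_lt hij hj)

-- membership in the occurrence-index set
lemma mem_occIdxSet (xs : List Int) (id : Int) (i : Int) :
    i ∈ occIdxSet xs id ↔ ∃ (k : Nat), k < xs.length ∧ i = (k : Int) ∧ xs.getD k 0 = id := by
  unfold occIdxSet
  rw [PySem.Set.mem_ofList, List.mem_map]
  constructor
  · rintro ⟨p, hp, rfl⟩
    rw [List.mem_filter] at hp
    obtain ⟨hmem, heq⟩ := hp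
    rw [PySem.List.mem_enumerate_iff] at hmem
    obtain ⟨k, hk, rfl⟩ := hmem
    simp only [beq_iff_eq] at heq
    exact ⟨k, hk, by simp, by rw [List.getD_eq_getElem xs 0 hk]; exact heq⟩
  · rintro ⟨k, hk, rfl, hid⟩
    refine ⟨((k : Int), xs[k]), ?_, by simp⟩
    rw [List.mem_filter]
    constructor
    · rw [PySem.List.mem_enumerate_iff]
      exact ⟨k, hk, by simp⟩
    · simp only [beq_iff_eq]
      rw [List.getD_eq_getElem xs 0 hk] at hid; exact hid
  
-- one disjointness test fails exactly on an (a-then-b) adjacency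
lemma isdisjoint_iff_no_adj (xs : List Int) (a b : Int) :
    PySem.Set.isdisjoint (occIdxSet xs b) (PySem.Set.ofList ((occIdxSet xs a).map (fun i => i + 1))) = true ↔
    ∀ k : Nat, ¬ (k + 1 < xs.length ∧ xs.getD k 0 = a ∧ xs.getD (k + 1) 0 = b) := by
  rw [PySem.Set.isdisjoint_iff]
  constructor
  · intro h k ⟨hk, ha, hb⟩
    have hbmem : ((k : Int) + 1) ∈ occIdxSet xs b := by
      rw [mem_occIdxSet]; exact ⟨k + 1, hk, by push_cast; ring, hb⟩
    have hamem : ((k : Int) + 1) ∈ (occIdxSet xs a).map (fun i => i + 1) := by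
      rw [List.mem_map]
      exact ⟨(k : Int), (mem_occIdxSet xs a _).mpr ⟨k, by omega, rfl, ha⟩, rfl⟩
    exact h _ hbmem ((PySem.Set.mem_ofList _ _).mpr hamem)
  · intro h x hxb hxa
    rw [PySem.Set.mem_ofList, List.mem_map] at hxa
    obtain ⟨y, hy, rfl⟩ := hxa
    rw [mem_occIdxSet] at hy
    obtain ⟨k, hk, rfl, ha⟩ := hy
    rw [mem_occIdxSet] at hxb
    obtain ⟨m, hm, hme, hb⟩ := hxb
    have : m = k + 1 := by omega
    subst this
    exact h k ⟨hm, ha, hb⟩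

lemma alt_iff (xs : List Int) (v l : Int) :
    match_next_or_previous_alt xs v l = true ↔ ∀ k, ¬ BadPair xs v l k := by
  unfold match_next_or_previous_alt
  rw [Bool.and_eq_true, isdisjoint_iff_no_adj xs v l, isdisjoint_iff_no_adj xs l v]
  unfold BadPair
  constructor
  · rintro ⟨h1, h2⟩ k ⟨hk, hc⟩
    rcases hc with ⟨ha, hb⟩ | ⟨ha, hb⟩
    · exact h1 k ⟨hk, ha, hb⟩
    · exact h2 k ⟨hk, ha, hb⟩
  · intro h
    refine ⟨fun k ⟨hk, ha, hb⟩ => h k ⟨hk, Or.inl ⟨ha, hb⟩⟩,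
            fun k ⟨hk, ha, hb⟩ => h k ⟨hk, Or.inr ⟨ha, hb⟩⟩⟩

lemma bad_bridge (xs : List Int) (v l : Int) :
    (∀ j, j < xs.length → ¬ BadIdx xs v l j) ↔ (∀ k, ¬ BadPair xs v l k) := by
  constructor
  · intro h k ⟨hk, hcase⟩
    rcases hcase with ⟨ha, hb⟩ | ⟨ha, hb⟩
    · exact h k (by omega) ⟨ha, Or.inr ⟨hk, hb⟩⟩
    · exact h (k + 1) hk ⟨hb, Or.inl ⟨by omega, by simpa using ha⟩⟩
  · intro h j hj ⟨hv, hnb⟩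
    rcases hnb with ⟨hj0, hl⟩ | ⟨hj1, hl⟩
    · apply h (j - 1)
      refine ⟨by omega, Or.inr ⟨hl, by rwa [Nat.sub_add_cancel (by omega)]⟩⟩
    · exact h j ⟨hj1, Or.inl ⟨hv, hl⟩⟩

-- ===== VERDICT (by name: the statement is the Claim_ definition above) =====
theorem match_next_or_previous_spec : Claim_equal_match_next_or_previous := by
  intro xs v l _
  unfold Spec_match_next_or_previous match_next_or_previous
  have hA := matchLoop_iff xs v l 0
  have hB := alt_iff xs v l
  simp only [Nat.zero_le, true_implies] at hA
  by_cases h : ∀ k, ¬ BadPair xs v l k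
  · rw [hB.mpr h, hA.mpr ((bad_bridge xs v l).mpr h)]
  · have hBf : match_next_or_previous_alt xs v l = false := by
      cases hb : match_next_or_previous_alt xs v l
      · rfl
      · exact absurd (hB.mp hb) h
    have hAf : matchNextOrPrevLoop xs v l 0 = false := by
      cases ha : matchNextOrPrevLoop xs v l 0
      · rfl
      · exact absurd ((bad_bridge xs v l).mp (hA.mp ha)) h
    rw [hAf, hBf]
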